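-- pv_equiv track=rewrite | github.com/MoXuann/sift.cpr | API/pros_cons.py | pros_clean_sentence
-- ===== SOURCE A (Python) =====
-- def pros_clean_sentence (json_file):
--     pros_list = []
--     for x in json_file['pros'][0]:
--         spec = x.split(",")
--         cleaned = [x.strip() for x in spec]
--         pros_list += cleaned
--     pros_list2 = []
--     for y in pros_list:
--         if '.' in y:
--             spec = y.split(".")
--             cleaned = [x.strip() for x in spec]
--             pros_list2 += cleaned
--         else:
--             pros_list2.append(y)
--     return pros_list2
-- ===== SOURCE B (Python) =====
-- def pros_clean_sentence(json_file):
--     return [part.strip()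
--             for x in json_file['pros'][0]
--             for part in x.replace('.', ',').split(',')]
-- ===== Notes on version B (the rewrite author's own statement) =====
-- stated objective: simpler
-- what changed: Replaces A's two accumulation passes (split on commas, then re-scan the pieces for periods with an 'if . in y' branch) by a single flat comprehension that normalizes '.' to ',' once and splits each sentence exactly once.
import Mathlib
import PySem

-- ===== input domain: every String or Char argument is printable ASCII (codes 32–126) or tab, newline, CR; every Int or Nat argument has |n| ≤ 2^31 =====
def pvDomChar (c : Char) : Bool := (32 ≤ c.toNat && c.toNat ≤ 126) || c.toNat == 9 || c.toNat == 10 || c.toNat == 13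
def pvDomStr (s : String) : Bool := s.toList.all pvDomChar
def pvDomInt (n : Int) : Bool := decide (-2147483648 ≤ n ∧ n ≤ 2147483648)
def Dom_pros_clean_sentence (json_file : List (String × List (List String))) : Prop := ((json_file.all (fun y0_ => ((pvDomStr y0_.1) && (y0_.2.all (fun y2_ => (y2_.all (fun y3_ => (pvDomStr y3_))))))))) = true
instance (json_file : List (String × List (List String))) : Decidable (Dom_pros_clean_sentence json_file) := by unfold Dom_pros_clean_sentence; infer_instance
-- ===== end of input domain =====

-- B replaces A's two accumulation passes (commas, then periods) by one flat pass that
-- normalizes '.' to ',' and splits each sentence once; objective: simpler.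


-- ===== PORT A =====
def pros_clean_sentence (json_file : List (String × List (List String))) : List String :=
  -- json_file['pros'][0]  (KeyError / IndexError excluded by Pre_)
  let pros := PySem.Dict.getD (PySem.Dict.mk json_file) "pros" []
  let row := PySem.List.pyGetD pros 0 []
  -- first loop: split on "," and strip
  let pros_list := row.foldl
    (fun acc x => acc ++ (PySem.Chars.splitOn x.toList [',']).map PySem.Chars.strip) []
  -- second loop: re-split the pieces that contain '.'
  let pros_list2 := pros_list.foldl
    (fun acc y =>
      if PySem.Chars.isIn ['.'] y then
        acc ++ (PySem.Chars.splitOn y ['.']).map PySem.Chars.strip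
      else acc ++ [y]) []
  pros_list2.map String.ofList

-- ===== PORT B =====
def pros_clean_sentence_alt (json_file : List (String × List (List String))) : List String :=
  let row := PySem.List.pyGetD (PySem.Dict.getD (PySem.Dict.mk json_file) "pros" []) 0 []
  row.flatMap (fun x =>
    (PySem.Chars.splitOn (PySem.Chars.replace x.toList ['.'] [',']) [',']).map
      (fun p => String.ofList (PySem.Chars.strip p)))

-- ===== PRECONDITION & SPEC =====
-- Pre_ excludes exactly the inputs where Python A raises: a missing 'pros' key (KeyError)
-- or an empty 'pros' list (IndexError on [0]).
def Pre_pros_clean_sentence (json_file : List (String × List (List String))) : Prop :=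
  ((PySem.Dict.get? (PySem.Dict.mk json_file) "pros").getD []) ≠ []
instance (json_file : List (String × List (List String))) : Decidable (Pre_pros_clean_sentence json_file) := by unfold Pre_pros_clean_sentence; infer_instance
def pvWitness_pros_clean_sentence : (List (String × List (List String))) :=
  [("pros", [["Nice UI, fast. Cheap", "light"]])]

def Spec_pros_clean_sentence (json_file : List (String × List (List String))) (out : List String) : Prop := out = pros_clean_sentence_alt json_file
instance (json_file : List (String × List (List String))) (out : List String) : Decidable (Spec_pros_clean_sentence json_file out) := by unfold Spec_pros_clean_sentence; infer_instance

-- ===== CLAIM (what is proved, stated in full; the proofs are below) =====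
def Claim_equal_pros_clean_sentence : Prop := ∀ (json_file : List (String × List (List String))), Dom_pros_clean_sentence json_file → Pre_pros_clean_sentence json_file → Spec_pros_clean_sentence json_file (pros_clean_sentence json_file)

-- ===== LEMMAS AND PROOFS =====

-- simple split on a single character: the normal form both pipelines are reduced to
def splitc (c : Char) : List Char → List (List Char)
  | [] => [[]]
  | a :: t =>
    if a = c then [] :: splitc c t
    else
      match splitc c t with
      | [] => [[a]]
      | h :: r => (a :: h) :: r

theorem splitc_ne_nil (c : Char) (s : List Char) : splitc c s ≠ [] := by
  cases s with
  | nil => simp [splitc]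
  | cons a t => simp only [splitc]; split; · simp
                split <;> simp

def consHead (pre : List Char) : List (List Char) → List (List Char)
  | [] => [pre]
  | h :: r => (pre ++ h) :: r


theorem go_spec (c : Char) (fuel : Nat) :
    ∀ (l cur : List Char) (acc : List (List Char)), l.length ≤ fuel →
    PySem.Chars.splitOn.go [c] fuel l cur acc = acc.reverse ++ consHead cur.reverse (splitc c l) := by
  induction fuel with
  | zero =>
    intro l cur acc h
    have : l = [] := by cases l <;> simp_all
    subst this
    simp [PySem.Chars.splitOn.go, splitc, consHead]
  | succ n ih =>
    intro l cur acc h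
    cases l with
    | nil => simp [PySem.Chars.splitOn.go, splitc, consHead]
    | cons a t =>
      rw [PySem.Chars.splitOn.go]
      by_cases hac : a = c
      · subst hac
        have hp : List.isPrefixOf [a] (a :: t) = true := by simp [List.isPrefixOf]
        simp only [hp, if_pos]
        have hd : List.drop [a].length (a :: t) = t := by simp
        rw [hd, ih t [] (cur.reverse :: acc) (by simpa using Nat.le_of_succ_le_succ h)]
        simp only [splitc, consHead, List.reverse_cons, List.append_assoc,
          List.reverse_nil, List.nil_append, List.singleton_append]
        rcases hsp : splitc a t with _ | ⟨h1, r1⟩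
        · exact absurd hsp (splitc_ne_nil a t)
        · simp
      · have hp : List.isPrefixOf [c] (a :: t) = false := by
          simp [List.isPrefixOf]; exact fun h' => absurd h'.symm hac
        simp only [hp]
        rw [ih t (a :: cur) acc (by simpa using Nat.le_of_succ_le_succ h)]
        simp only [splitc, if_neg hac]
        rcases hsp : splitc c t with _ | ⟨h1, r1⟩
        · exact absurd hsp (splitc_ne_nil c t)
        · simp [consHead]

theorem splitOn_single (c : Char) (s : List Char) :
    PySem.Chars.splitOn s [c] = splitc c s := by
  rw [PySem.Chars.splitOn, go_spec c (s.length+1) s [] [] (by omega)]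
  rcases hsp : splitc c s with _ | ⟨h1, r1⟩
  · exact absurd hsp (splitc_ne_nil c s)
  · simp [consHead]

theorem replace_go_spec (fuel : Nat) :
    ∀ (l acc : List Char), l.length ≤ fuel →
    PySem.Chars.replace.go ['.'] [','] fuel l acc
      = acc.reverse ++ l.map (fun a => if a = '.' then ',' else a) := by
  induction fuel with
  | zero =>
    intro l acc h
    have : l = [] := by cases l <;> simp_all
    subst this; simp [PySem.Chars.replace.go]
  | succ n ih =>
    intro l acc h
    cases l with
    | nil => simp [PySem.Chars.replace.go]
    | cons a t =>
      rw [PySem.Chars.replace.go]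
      by_cases hac : a = '.'
      · subst hac
        have hp : List.isPrefixOf ['.'] ('.' :: t) = true := by simp [List.isPrefixOf]
        simp only [hp, if_pos]
        have hd : List.drop ['.'].length ('.' :: t) = t := by simp
        have hrv : [','].reverse ++ acc = ',' :: acc := by simp
        rw [hd, hrv, ih t (',' :: acc) (by simpa using Nat.le_of_succ_le_succ h)]
        simp
      · have hp : List.isPrefixOf ['.'] (a :: t) = false := by
          simp [List.isPrefixOf]; exact fun h' => absurd h'.symm hac
        simp only [hp]
        rw [ih t (a :: acc) (by simpa using Nat.le_of_succ_le_succ h)]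
        simp [hac]

theorem replace_single (s : List Char) :
    PySem.Chars.replace s ['.'] [','] = s.map (fun a => if a = '.' then ',' else a) := by
  rw [PySem.Chars.replace]
  simp only [List.isEmpty_cons]
  exact replace_go_spec s.length s [] (le_refl _)

-- ---------- glue lemmas for splitc over ++ ----------
def glueLast : List (List Char) → List Char → List (List Char)
  | [], suf => [suf]
  | [h], suf => [h ++ suf]
  | h :: h2 :: r, suf => h :: glueLast (h2 :: r) suf

theorem glueLast_ne_nil (xs : List (List Char)) (suf : List Char) : glueLast xs suf ≠ [] := by
  match xs with
  | [] => simp [glueLast]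
  | [h] => simp [glueLast]
  | h :: h2 :: r => simp [glueLast]

theorem splitc_no_c (c : Char) (t : List Char) (h : ∀ a ∈ t, a ≠ c) : splitc c t = [t] := by
  induction t with
  | nil => simp [splitc]
  | cons a t ih =>
    have ha : a ≠ c := h a (by simp)
    rw [splitc, if_neg ha, ih (fun x hx => h x (by simp [hx]))]

theorem splitc_append_right (c : Char) (s t : List Char) (ht : ∀ a ∈ t, a ≠ c) :
    splitc c (s ++ t) = glueLast (splitc c s) t := by
  induction s with
  | nil => simp [splitc_no_c c t ht, splitc, glueLast]
  | cons a s ih =>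
    by_cases hac : a = c
    · subst hac
      rw [List.cons_append, splitc, if_pos rfl, ih, splitc, if_pos rfl]
      rcases hs : splitc a s with _ | ⟨h1, r1⟩
      · exact absurd hs (splitc_ne_nil a s)
      · simp [glueLast]
    · rw [List.cons_append, splitc, if_neg hac, ih, splitc, if_neg hac]
      rcases hs : splitc c s with _ | ⟨h1, r1⟩
      · exact absurd hs (splitc_ne_nil c s)
      · rcases r1 with _ | ⟨h2, r2⟩
        · simp [glueLast]
        · simp [glueLast]

theorem splitc_append_left (c : Char) (t s : List Char) (ht : ∀ a ∈ t, a ≠ c) :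
    splitc c (t ++ s) = consHead t (splitc c s) := by
  induction t with
  | nil =>
    rcases hs : splitc c s with _ | ⟨h1, r1⟩
    · exact absurd hs (splitc_ne_nil c s)
    · simp [consHead, hs]
  | cons a t ih =>
    have ha : a ≠ c := ht a (by simp)
    rw [List.cons_append, splitc, if_neg ha, ih (fun x hx => ht x (by simp [hx]))]
    rcases hs : splitc c s with _ | ⟨h1, r1⟩
    · exact absurd hs (splitc_ne_nil c s)
    · simp [consHead]

-- ---------- strip and whitespace lemmas ----------
theorem strip_spaces_left (t x : List Char) (ht : ∀ a ∈ t, PySem.Chars.isspace a = true) :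
    PySem.Chars.strip (t ++ x) = PySem.Chars.strip x := by
  have h1 : List.dropWhile PySem.Chars.isspace t = [] := by
    rw [List.dropWhile_eq_nil_iff]; exact ht
  rw [PySem.Chars.strip, PySem.Chars.strip, PySem.Chars.lstrip, PySem.Chars.lstrip,
    List.dropWhile_append, h1]
  simp

theorem rstrip_spaces (y t : List Char) (ht : ∀ a ∈ t, PySem.Chars.isspace a = true) :
    PySem.Chars.rstrip (y ++ t) = PySem.Chars.rstrip y := by
  have h1 : List.dropWhile PySem.Chars.isspace t.reverse = [] := by
    rw [List.dropWhile_eq_nil_iff]; simp only [List.mem_reverse]; exact ht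
  rw [PySem.Chars.rstrip, PySem.Chars.rstrip, List.reverse_append, List.dropWhile_append, h1]
  simp

theorem strip_spaces_right (x t : List Char) (ht : ∀ a ∈ t, PySem.Chars.isspace a = true) :
    PySem.Chars.strip (x ++ t) = PySem.Chars.strip x := by
  rw [PySem.Chars.strip, PySem.Chars.strip, PySem.Chars.lstrip, PySem.Chars.lstrip,
    List.dropWhile_append]
  split
  · rename_i hx
    have h1 : List.dropWhile PySem.Chars.isspace t = [] := by
      rw [List.dropWhile_eq_nil_iff]; exact ht
    rw [h1]
    simp only [List.isEmpty_iff] at hx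
    rw [hx]
  · exact rstrip_spaces _ t ht

theorem strip_decomp (s : List Char) :
    ∃ a b, (∀ x ∈ a, PySem.Chars.isspace x = true) ∧ (∀ x ∈ b, PySem.Chars.isspace x = true) ∧
      s = a ++ PySem.Chars.strip s ++ b := by
  refine ⟨List.takeWhile PySem.Chars.isspace s,
    (List.takeWhile PySem.Chars.isspace (List.dropWhile PySem.Chars.isspace s).reverse).reverse,
    fun x hx => List.mem_takeWhile_imp hx, ?_, ?_⟩
  · intro x hx
    rw [List.mem_reverse] at hx
    exact List.mem_takeWhile_imp hx
  · conv_lhs => rw [← List.takeWhile_append_dropWhile (p := PySem.Chars.isspace) (l := s)]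
    rw [List.append_assoc]
    congr 1
    rw [PySem.Chars.strip, PySem.Chars.lstrip, PySem.Chars.rstrip]
    conv_lhs => rw [← List.reverse_reverse (List.dropWhile PySem.Chars.isspace s)]
    conv_lhs => rw [← List.takeWhile_append_dropWhile (p := PySem.Chars.isspace)
      (l := (List.dropWhile PySem.Chars.isspace s).reverse)]
    rw [List.reverse_append]

theorem mem_strip_iff (c : Char) (s : List Char) (hc : PySem.Chars.isspace c = false) :
    c ∈ PySem.Chars.strip s ↔ c ∈ s := by
  obtain ⟨a, b, ha, hb, hs⟩ := strip_decomp s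
  constructor
  · intro h; rw [hs]; simp [h]
  · intro h
    rw [hs] at h
    simp only [List.mem_append] at h
    rcases h with (h | h) | h
    · exact absurd (ha c h) (by simp [hc])
    · exact h
    · exact absurd (hb c h) (by simp [hc])

-- ---------- map strip ignores glued whitespace ----------
theorem mapstrip_consHead (t : List Char) (xs : List (List Char))
    (ht : ∀ a ∈ t, PySem.Chars.isspace a = true) (hxs : xs ≠ []) :
    (consHead t xs).map PySem.Chars.strip = xs.map PySem.Chars.strip := by
  cases xs with
  | nil => exact absurd rfl hxs
  | cons h r => simp [consHead, strip_spaces_left t h ht]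

theorem mapstrip_glueLast (xs : List (List Char)) (b : List Char)
    (hb : ∀ a ∈ b, PySem.Chars.isspace a = true) (hxs : xs ≠ []) :
    (glueLast xs b).map PySem.Chars.strip = xs.map PySem.Chars.strip := by
  match xs with
  | [] => exact absurd rfl hxs
  | [h] => simp [glueLast, strip_spaces_right h b hb]
  | h :: h2 :: r =>
    rw [glueLast]
    simp only [List.map_cons]
    congr 1
    exact mapstrip_glueLast (h2 :: r) b hb (by simp)

theorem isspace_dot : PySem.Chars.isspace '.' = false := by decide
theorem isIn_dot (y : List Char) : PySem.Chars.isIn ['.'] y = true ↔ '.' ∈ y := by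
  rw [PySem.Chars.isIn_iff_infix]
  exact List.singleton_infix_iff '.' y

-- the per-piece lemma: A's second pass on a stripped comma-piece equals
-- strip-after-dot-split of the raw piece
theorem piece_lemma (p : List Char) :
    (if PySem.Chars.isIn ['.'] (PySem.Chars.strip p) then
        (splitc '.' (PySem.Chars.strip p)).map PySem.Chars.strip
      else [PySem.Chars.strip p])
    = (splitc '.' p).map PySem.Chars.strip := by
  by_cases hm : '.' ∈ p
  · have hms : '.' ∈ PySem.Chars.strip p := (mem_strip_iff '.' p isspace_dot).mpr hm
    rw [if_pos ((isIn_dot _).mpr hms)]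
    obtain ⟨a, b, ha, hb, hs⟩ := strip_decomp p
    have hane : ∀ x ∈ a, x ≠ '.' := fun x hx he => by
      rw [he] at hx; exact absurd (ha '.' hx) (by simp [isspace_dot])
    have hbne : ∀ x ∈ b, x ≠ '.' := fun x hx he => by
      rw [he] at hx; exact absurd (hb '.' hx) (by simp [isspace_dot])
    conv_rhs => rw [hs]
    rw [List.append_assoc, splitc_append_left '.' a _ hane,
      splitc_append_right '.' _ b hbne,
      mapstrip_consHead a _ ha (glueLast_ne_nil _ _),
      mapstrip_glueLast _ b hb (splitc_ne_nil _ _)]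
  · have hms : '.' ∉ PySem.Chars.strip p := fun h => hm ((mem_strip_iff '.' p isspace_dot).mp h)
    rw [if_neg (by rw [isIn_dot]; exact hms),
      splitc_no_c '.' p (fun x hx he => hm (he ▸ hx))]
    rfl

-- splitting on ',' after replacing '.' by ',' = dot-split of every comma-piece
theorem split_replace (s : List Char) :
    splitc ',' (s.map (fun a => if a = '.' then ',' else a))
      = (splitc ',' s).flatMap (splitc '.') := by
  induction s with
  | nil => simp [splitc]
  | cons a t ih =>
    by_cases h1 : a = ','
    · subst h1
      rw [List.map_cons, if_neg (by decide : ¬(',' = '.')), splitc, if_pos rfl, ih,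
        splitc, if_pos rfl, List.flatMap_cons]
      simp [splitc]
    · by_cases h2 : a = '.'
      · subst h2
        rcases hs : splitc ',' t with _ | ⟨h, r⟩
        · exact absurd hs (splitc_ne_nil _ _)
        rw [List.map_cons, if_pos rfl, splitc, if_pos rfl, ih, hs, splitc,
          if_neg (by decide : ¬('.' = ',')), hs, List.flatMap_cons, List.flatMap_cons,
          splitc, if_pos rfl]
        simp
      · rcases hs : splitc ',' t with _ | ⟨h, r⟩
        · exact absurd hs (splitc_ne_nil _ _)
        rcases hd : splitc '.' h with _ | ⟨h1', r1'⟩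
        · exact absurd hd (splitc_ne_nil _ _)
        have ih' : splitc ',' (t.map (fun a => if a = '.' then ',' else a))
            = h1' :: (r1' ++ (splitc ',' t).tail.flatMap (splitc '.')) := by
          rw [ih, hs, List.flatMap_cons, hd]
          simp
        rw [List.map_cons, if_neg h2, splitc, if_neg h1, ih', splitc, if_neg h1, hs,
          List.flatMap_cons]
        simp [splitc, if_neg h2, hd]

theorem per_x (x : String) :
    List.map String.ofList
      (List.flatMap
        (fun y => if PySem.Chars.isIn ['.'] y then
            (PySem.Chars.splitOn y ['.']).map PySem.Chars.strip
          else [y])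
        ((PySem.Chars.splitOn x.toList [',']).map PySem.Chars.strip))
    = (PySem.Chars.splitOn (PySem.Chars.replace x.toList ['.'] [',']) [',']).map
        (fun p => String.ofList (PySem.Chars.strip p)) := by
  rw [replace_single]
  simp only [splitOn_single, split_replace]
  rw [List.flatMap_map]
  simp only [piece_lemma]
  simp [List.map_flatMap, List.map_map, Function.comp_def]

theorem final (row : List String) :
    (List.map String.ofList
      ((row.foldl (fun acc x => acc ++ (PySem.Chars.splitOn x.toList [',']).map PySem.Chars.strip) []).foldl
        (fun acc y =>
          if PySem.Chars.isIn ['.'] y then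
            acc ++ (PySem.Chars.splitOn y ['.']).map PySem.Chars.strip
          else acc ++ [y]) []))
    = row.flatMap (fun x =>
        (PySem.Chars.splitOn (PySem.Chars.replace x.toList ['.'] [',']) [',']).map
          (fun p => String.ofList (PySem.Chars.strip p))) := by
  rw [PySem.List.foldl_append_eq_flatMap]
  have hfun : (fun (acc : List (List Char)) y =>
      if PySem.Chars.isIn ['.'] y then
        acc ++ (PySem.Chars.splitOn y ['.']).map PySem.Chars.strip
      else acc ++ [y])
    = (fun acc y => acc ++ (if PySem.Chars.isIn ['.'] y then
        (PySem.Chars.splitOn y ['.']).map PySem.Chars.strip else [y])) := by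
    funext acc y; split <;> rfl
  rw [hfun, PySem.List.foldl_append_eq_flatMap, List.nil_append, List.nil_append,
    List.flatMap_assoc]
  rw [List.map_flatMap]
  exact List.flatMap_congr (fun x _ => per_x x)

-- ===== VERDICT (by name: the statement is the Claim_ definition above) =====
theorem pros_clean_sentence_spec : Claim_equal_pros_clean_sentence := by
  intro json_file _ _
  unfold Spec_pros_clean_sentence pros_clean_sentence pros_clean_sentence_alt
  exact final _
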